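-- pv_equiv track=rewrite | github.com/NewMountain/algo_practice | chapter_4/4_7.py | find_node
-- ===== SOURCE A (Python) =====
-- import copy
--
-- dependencies = [("a", "d"), ("f", "b"), ("b", "d"), ("f", "a"), ("d", "c")]
--
-- def find_node(build_order, dependencies):
--     """Find a dependency and add to build order."""
--     # Pointers on dictionaries are evil
--     # Algo now is simple, iterate through the keys
--     # Remove the key and also remove it from any other list of values
--     d = copy.deepcopy(dependencies)
--     # So we can delete all instances without depedencies in one pass
--     for k, v in d.items():
--         # Find a key with an empty list of values,
--         if not v:
--             # Add k to the build order
--             build_order.append(k)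
--             # Delete the key from dependencies
--             del dependencies[k]
--             # Now remove the k from all dependency sets
--             # I wish set operations were pure functions in Python
--             _trigger_io = {key: value.discard(k) for key, value in dependencies.items()}
--
--     return build_order, dependencies
-- ===== SOURCE B (Python) =====
-- def find_node(build_order, dependencies):
--     """Find a dependency and add to build order."""
--     # One pass: collect the dependency-free keys, then rebuild the remaining
--     # dict with a single set-difference per value (no per-key rescan of the dict).
--     removed = [k for k, v in dependencies.items() if not v]
--     build_order += removed  # same in-place growth of build_order as A
--     gone = set(removed)
--     remaining = {k: v - gone for k, v in dependencies.items() if v}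
--     return build_order, remaining
-- ===== Notes on version B (the rewrite author's own statement) =====
-- stated objective: faster
-- what changed: B collects the dependency-free keys in one pass and rebuilds the remaining dict once with a single set-difference per value, instead of A's per-removed-key delete plus full rescan-and-discard over the whole dict.
import Mathlib
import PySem

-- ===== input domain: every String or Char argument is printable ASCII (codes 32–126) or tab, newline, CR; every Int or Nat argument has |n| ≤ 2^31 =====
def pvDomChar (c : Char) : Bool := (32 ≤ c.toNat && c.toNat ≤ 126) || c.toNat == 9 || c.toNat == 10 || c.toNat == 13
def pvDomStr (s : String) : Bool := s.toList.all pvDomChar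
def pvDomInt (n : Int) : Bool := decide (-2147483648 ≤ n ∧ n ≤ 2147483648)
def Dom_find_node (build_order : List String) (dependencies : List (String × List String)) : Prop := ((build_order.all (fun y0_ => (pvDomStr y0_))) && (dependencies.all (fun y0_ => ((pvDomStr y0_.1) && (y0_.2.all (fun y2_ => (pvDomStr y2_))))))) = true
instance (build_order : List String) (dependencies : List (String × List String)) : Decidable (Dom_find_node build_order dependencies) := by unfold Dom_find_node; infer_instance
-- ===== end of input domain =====

-- B rebuilds the remaining dict in one pass with one set-difference per value instead of A's
-- per-removed-key rescan; equivalence is about the RETURN value only: A mutates both arguments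
-- in place (appends to build_order, deletes from / discards inside dependencies), B only
-- extends build_order in place.

-- ===== PORT A =====
-- dict[str, set[str]] is the association list with unique keys (Pre_); 'del dependencies[k]'
-- is ported as removing the entries with key k (exact on unique keys), and 'value.discard(k)'
-- as filtering k out of the element list (exact: order-preserving removal from a duplicate-free set list).
def find_node (build_order : List String) (dependencies : List (String × List String)) : List String × (List (String × List String)) :=
  -- for k, v in d.items(): iterate over the (deep-copied, hence original) item list,
  -- threading the mutated (build_order, dependencies) as the fold state
  dependencies.foldl
    (fun st kv =>
      if kv.2.isEmpty then
        (st.1 ++ [kv.1],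
         (st.2.filter (fun p => p.1 != kv.1)).map (fun p => (p.1, p.2.filter (fun x => x != kv.1))))
      else st)
    (build_order, dependencies)

-- ===== PORT B =====
def find_node_alt (build_order : List String) (dependencies : List (String × List String)) : List String × (List (String × List String)) :=
  let removed := (dependencies.filter (fun p => p.2.isEmpty)).map Prod.fst
  let gone := PySem.Set.ofList removed
  (build_order ++ removed,
   (dependencies.filter (fun p => !p.2.isEmpty)).map
     (fun p => (p.1, p.2.filter (fun x => !(PySem.Set.contains gone x)))))

-- ===== PRECONDITION & SPEC =====
-- Pre_ is the representation invariant of the Python argument dict[str, set[str]]: the keys of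
-- the association list are distinct (a Python dict cannot hold duplicate keys, so this excludes
-- no Python input).
def Pre_find_node (build_order : List String) (dependencies : List (String × List String)) : Prop :=
  (dependencies.map Prod.fst).Nodup
instance (build_order : List String) (dependencies : List (String × List String)) : Decidable (Pre_find_node build_order dependencies) := by unfold Pre_find_node; infer_instance

def pvWitness_find_node : List String × (List (String × List String)) :=
  (["z"], [("a", ["d"]), ("c", []), ("d", ["c", "a"]), ("e", [])])

def Spec_find_node (build_order : List String) (dependencies : List (String × List String)) (out : List String × (List (String × List String))) : Prop := out = find_node_alt build_order dependencies
instance (build_order : List String) (dependencies : List (String × List String)) (out : List String × (List (String × List String))) : Decidable (Spec_find_node build_order dependencies out) := by unfold Spec_find_node; infer_instance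

-- ===== CLAIM (what is proved, stated in full; the proofs are below) =====
def Claim_equal_find_node : Prop := ∀ (build_order : List String) (dependencies : List (String × List String)), Dom_find_node build_order dependencies → Pre_find_node build_order dependencies → Spec_find_node build_order dependencies (find_node build_order dependencies)

-- ===== LEMMAS AND PROOFS =====

-- the single mutation step of A: delete key k and discard k from every remaining value
def pvApp (deps : List (String × List String)) (k : String) : List (String × List String) :=
  (deps.filter (fun p => p.1 != k)).map (fun p => (p.1, p.2.filter (fun x => x != k)))

-- the keys A removes: those whose original value set is empty, in order
def pvRem (l : List (String × List String)) : List String :=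
  (l.filter (fun p => p.2.isEmpty)).map Prod.fst

-- A's fold splits: build_order grows by pvRem, the dict undergoes pvApp once per removed key
theorem pv_foldA (l : List (String × List String)) (bo : List String) (deps : List (String × List String)) :
    l.foldl
      (fun st kv =>
        if kv.2.isEmpty then
          (st.1 ++ [kv.1],
           (st.2.filter (fun p => p.1 != kv.1)).map (fun p => (p.1, p.2.filter (fun x => x != kv.1))))
        else st)
      (bo, deps)
    = (bo ++ pvRem l, (pvRem l).foldl pvApp deps) := by
  induction l generalizing bo deps with
  | nil => simp [pvRem]
  | cons kv t ih =>
    rw [List.foldl_cons]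
    by_cases h : kv.2.isEmpty
    · rw [if_pos h, ih]
      simp [pvRem, pvApp, h, List.append_assoc]
    · rw [if_neg h, ih]
      simp [pvRem, h]

-- iterating pvApp over a key list = one filter of the entries plus one filter of each value
theorem pv_foldApp (ks : List String) (deps : List (String × List String)) :
    ks.foldl pvApp deps
    = (deps.filter (fun p => !ks.contains p.1)).map
        (fun p => (p.1, p.2.filter (fun x => !ks.contains x))) := by
  induction ks generalizing deps with
  | nil =>
    simp
  | cons k t ih =>
    simp only [List.foldl_cons, ih, pvApp]
    rw [List.filter_map, List.map_map]
    rw [List.filter_filter]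
    congr 1
    · funext p
      simp only [Function.comp_apply]
      rw [List.filter_filter]
      refine congrArg (fun v => (p.1, v)) ?_
      apply List.filter_congr
      intro x _
      simp only [List.contains_cons, Bool.not_or, bne]
      rw [Bool.and_comm]
    · apply List.filter_congr
      intro p _
      simp only [Function.comp_apply, List.contains_cons, Bool.not_or, bne]
      rw [Bool.and_comm]

-- under distinct keys, "key not among the removed keys" = "value set nonempty", entrywise
theorem pv_key_mem (deps : List (String × List String)) (h : (deps.map Prod.fst).Nodup)
    (p : String × List String) (hp : p ∈ deps) :
    (!(pvRem deps).contains p.1) = !p.2.isEmpty := by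
  by_cases he : p.2.isEmpty
  · have : p.1 ∈ pvRem deps := by
      simp only [pvRem, List.mem_map]
      exact ⟨p, List.mem_filter.2 ⟨hp, by simp [he]⟩, rfl⟩
    simp [he, this]
  · have : p.1 ∉ pvRem deps := by
      simp only [pvRem, List.mem_map]
      rintro ⟨q, hq, hq1⟩
      have hqd := (List.mem_filter.1 hq).1
      have hqe := (List.mem_filter.1 hq).2
      have : q = p := List.inj_on_of_nodup_map h hqd hp hq1
      subst this
      simp at hqe
      exact he (by simp [hqe])
    simp [he, this]

-- ===== VERDICT (by name: the statement is the Claim_ definition above) =====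
theorem find_node_spec : Claim_equal_find_node := by
  intro bo deps _ hpre
  unfold Spec_find_node find_node find_node_alt
  rw [pv_foldA, pv_foldApp]
  refine congrArg (fun d => (bo ++ pvRem deps, d)) ?_
  rw [List.filter_congr (fun p hp => pv_key_mem deps hpre p hp)]
  apply List.map_congr_left
  intro p _
  refine congrArg (fun v => (p.1, v)) ?_
  apply List.filter_congr
  intro x _
  simp [pvRem, PySem.Set.contains_eq_listContains, PySem.Set.mem_ofList]
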